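-- pv_equiv track=rewrite | github.com/momentum-cohort-2019-02/w2-mystery-word-angelkt07 | mystery_word.py | dict_with_length
-- ===== SOURCE A (Python) =====
-- def dict_with_length(words):
--     """take list of words and count characters"""
--     word_length = {}
--     for word in words:
--         if word in word_length:
--             word_length[word] = word_length[word] + len(word)
--         else:
--             word_length[word] = len(word)
--     return word_length
-- ===== SOURCE B (Python) =====
-- from collections import Counter
--
-- def dict_with_length(words):
--     """take list of words and count characters"""
--     counts = Counter(words)
--     return {w: c * len(w) for w, c in counts.items()}
-- ===== Notes on version B (the rewrite author's own statement) =====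
-- stated objective: simpler
-- what changed: Counts occurrences once with Counter and builds the result in a second pass as count*len(word), replacing the per-occurrence incremental dict update with a count-then-multiply closed form.
import Mathlib
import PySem

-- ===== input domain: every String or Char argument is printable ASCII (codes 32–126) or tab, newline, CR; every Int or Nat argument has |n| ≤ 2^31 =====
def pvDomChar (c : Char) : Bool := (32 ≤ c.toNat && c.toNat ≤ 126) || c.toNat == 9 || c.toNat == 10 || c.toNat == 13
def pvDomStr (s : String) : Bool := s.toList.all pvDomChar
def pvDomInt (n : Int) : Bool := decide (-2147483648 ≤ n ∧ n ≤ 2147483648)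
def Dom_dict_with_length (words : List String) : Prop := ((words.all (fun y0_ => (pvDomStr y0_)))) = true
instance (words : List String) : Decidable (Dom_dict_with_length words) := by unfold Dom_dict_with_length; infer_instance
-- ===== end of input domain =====

-- B replaces A's per-occurrence incremental dict update with count-then-multiply (Counter, then c * len(w)); objective: simpler.

-- ===== PORT A =====
-- literal port: per-occurrence loop, 'if word in dict' branch, incremental addition
def dict_with_length (words : List String) : List (String × Int) :=
  (words.foldl (fun d word =>
    if d.contains word then d.insert word (d.getD word 0 + PySem.Str.len word)
    else d.insert word (PySem.Str.len word)) PySem.Dict.empty).items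

-- ===== PORT B =====
-- Counter(words), then map each (w, c) to (w, c * len w)
def dict_with_length_alt (words : List String) : List (String × Int) :=
  (PySem.Dict.counter words).items.map (fun p => (p.1, p.2 * PySem.Str.len p.1))

-- ===== PRECONDITION & SPEC =====
def Spec_dict_with_length (words : List String) (out : List (String × Int)) : Prop := out = dict_with_length_alt words
instance (words : List String) (out : List (String × Int)) : Decidable (Spec_dict_with_length words out) := by unfold Spec_dict_with_length; infer_instance

-- ===== CLAIM (what is proved, stated in full; the proofs are below) =====
def Claim_equal_dict_with_length : Prop := ∀ (words : List String), Dom_dict_with_length words → Spec_dict_with_length words (dict_with_length words)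

-- ===== LEMMAS AND PROOFS =====

-- A's loop step always equals 'insert word (getD word 0 + len word)'
theorem pv_step_eq (d : PySem.Dict String Int) (w : String) :
    (if d.contains w then d.insert w (d.getD w 0 + PySem.Str.len w)
     else d.insert w (PySem.Str.len w)) = d.insert w (d.getD w 0 + PySem.Str.len w) := by
  by_cases h : d.contains w = true
  · simp [h]
  · have h' : d.contains w = false := by simpa using h
    rw [PySem.Dict.getD_of_not_contains d _ h']
    simp [h']

-- items of A's fold, in closed form
theorem pv_items_fold (l : List String) :
    ((l.foldl (fun d w => d.insert w (d.getD w 0 + PySem.Str.len w)) PySem.Dict.empty).items)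
      = (PySem.Set.ofList l).map (fun k => (k, (l.count k : Int) * PySem.Str.len k)) := by
  induction l using List.reverseRecOn with
  | nil => simp [PySem.Set.ofList_nil, PySem.Dict.empty]
  | append_singleton l w ih =>
    rw [List.foldl_append, List.foldl_cons, List.foldl_nil]
    set F := l.foldl (fun d w => d.insert w (d.getD w 0 + PySem.Str.len w)) PySem.Dict.empty with hF
    have hnodup : ((PySem.Set.ofList l).map
        (fun k => (k, (l.count k : Int) * PySem.Str.len k))).map Prod.fst |>.Nodup := by
      simp only [List.map_map]
      have : (Prod.fst ∘ fun k => (k, (l.count k : Int) * PySem.Str.len k)) = id := rfl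
      rw [this, List.map_id]
      exact PySem.Set.nodup_ofList l
    have hkeysnodup : F.keys.Nodup := by
      have : F.keys = ((PySem.Set.ofList l).map
          (fun k => (k, (l.count k : Int) * PySem.Str.len k))).map Prod.fst := by
        simp only [PySem.Dict.keys, ih]
      rw [this]; exact hnodup
    have hcontains : F.contains w = decide (w ∈ PySem.Set.ofList l) := by
      rw [PySem.Dict.contains_eq_decide_mem_keys]
      simp only [PySem.Dict.keys, ih, List.map_map]
      have : (Prod.fst ∘ fun k => (k, (l.count k : Int) * PySem.Str.len k)) = id := rfl
      rw [this, List.map_id]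
    by_cases hw : w ∈ PySem.Set.ofList l
    · have hc : F.contains w = true := by rw [hcontains]; simpa using hw
      have hmem : (w, (l.count w : Int) * PySem.Str.len w) ∈ F.items := by
        rw [ih]; exact List.mem_map.mpr ⟨w, hw, rfl⟩
      have hgetD : F.getD w 0 = (l.count w : Int) * PySem.Str.len w :=
        PySem.Dict.getD_of_mem_items F hmem hkeysnodup 0
      rw [PySem.Dict.items_insert_of_contains F _ hc, ih, hgetD]
      have hofl : PySem.Set.ofList (l ++ [w]) = PySem.Set.ofList l := by
        rw [PySem.Set.ofList_append_singleton, PySem.Set.add_of_mem hw]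
      rw [hofl, List.map_map]
      apply List.map_congr_left
      intro k hk
      simp only [Function.comp]
      by_cases hkw : k = w
      · subst hkw
        simp [List.count_append]
        ring
      · have : (k == w) = false := by simp [hkw]
        simp only [this, List.count_append]
        have : [w].count k = 0 := by simp [List.count_singleton]; exact fun h => hkw h.symm
        simp [this]
    · have hc : F.contains w = false := by rw [hcontains]; simpa using hw
      have hgetD : F.getD w 0 = 0 := PySem.Dict.getD_of_not_contains F _ hc
      rw [PySem.Dict.items_insert_of_not_contains F _ hc, ih, hgetD]
      have hofl : PySem.Set.ofList (l ++ [w]) = PySem.Set.ofList l ++ [w] := by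
        rw [PySem.Set.ofList_append_singleton, PySem.Set.add_of_not_mem hw]
      rw [hofl, List.map_append]
      congr 1
      · apply List.map_congr_left
        intro k hk
        have hkw : k ≠ w := fun h => hw (h ▸ hk)
        have : [w].count k = 0 := by simp [List.count_singleton]; exact fun h => hkw h.symm
        simp [List.count_append, this]
      · have hcl : l.count w = 0 := by
          have hwl : w ∉ l := fun h => hw ((PySem.Set.mem_ofList l w).mpr h)
          exact List.count_eq_zero.mpr hwl
        simp [List.count_append, hcl]

-- ===== VERDICT (by name: the statement is the Claim_ definition above) =====
theorem dict_with_length_spec : Claim_equal_dict_with_length := by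
  intro words _
  unfold Spec_dict_with_length dict_with_length dict_with_length_alt
  have hstep : (fun (d : PySem.Dict String Int) (word : String) =>
      if d.contains word then d.insert word (d.getD word 0 + PySem.Str.len word)
      else d.insert word (PySem.Str.len word))
      = fun d word => d.insert word (d.getD word 0 + PySem.Str.len word) := by
    funext d w; exact pv_step_eq d w
  rw [hstep, pv_items_fold, PySem.Dict.items_counter, List.map_map]
  apply List.map_congr_left
  intro k hk
  simp [Function.comp, mul_comm]
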